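-- pv_equiv track=rewrite | github.com/HumphreyHCB/BuboExperiments | LoopProfiling/TestBuboRunToPlot/scripts/build_total_pct_slowdown_per_loop.py | infer_probe_nodes_for_loopid
-- ===== SOURCE A (Python) =====
-- from typing import Dict, List, Optional, Tuple, Set
-- from collections import defaultdict
--
-- def infer_probe_nodes_for_loopid(
--     node_looplabel: Dict[str, str],
--     node_rdtsc_loopid: Dict[str, int],
--     edges: List[Tuple[str, str]],
--     looplabel_to_id: Dict[str, int],
-- ) -> Dict[int, Set[str]]:
--     """
--     NEW:
--     Determine which CFG nodes are "probe nodes" for each loop_id.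
--
--     Heuristic:
--       - A probe node is a node that contains the RDTSC marker (node_rdtsc_loopid).
--       - Assign it to the loop it *targets* (successor node with a loop label),
--         using looplabel_to_id.
--       - If we can't find a loop-labeled successor, fall back to the marker LoopID.
--     """
--     succs: Dict[str, List[str]] = {}
--     for s, d in edges:
--         succs.setdefault(s, []).append(d)
--
--     out: Dict[int, Set[str]] = defaultdict(set)
--
--     for src, marker_loopid in node_rdtsc_loopid.items():
--         assigned: Optional[int] = None
--         for dst in succs.get(src, []):
--             lx = node_looplabel.get(dst)
--             if lx is None:
--                 continue
--             lid = looplabel_to_id.get(lx)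
--             if lid is not None:
--                 assigned = lid
--                 break
--
--         if assigned is None:
--             assigned = marker_loopid
--
--         out[assigned].add(src)
--
--     return out
-- ===== SOURCE B (Python) =====
-- from typing import Dict, List, Optional, Tuple, Set
--
--
-- def _first_target_lid(node_looplabel, looplabel_to_id, edges, src):
--     # first edge out of src whose destination carries a resolvable loop label
--     for s, d in edges:
--         if s == src and d in node_looplabel and node_looplabel[d] in looplabel_to_id:
--             return looplabel_to_id[node_looplabel[d]]
--     return None
--
--
-- def infer_probe_nodes_for_loopid(
--     node_looplabel: Dict[str, str],
--     node_rdtsc_loopid: Dict[str, int],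
--     edges: List[Tuple[str, str]],
--     looplabel_to_id: Dict[str, int],
-- ) -> Dict[int, Set[str]]:
--     # No successor adjacency map, no defaultdict: resolve each RDTSC node by a
--     # direct scan of the edge list, and group with a plain dict + setdefault.
--     out: Dict[int, Set[str]] = {}
--     for src, marker_loopid in node_rdtsc_loopid.items():
--         lid = _first_target_lid(node_looplabel, looplabel_to_id, edges, src)
--         out.setdefault(marker_loopid if lid is None else lid, set()).add(src)
--     return out
-- ===== Notes on version B (the rewrite author's own statement) =====
-- stated objective: simpler
-- what changed: B drops A's successor adjacency map and defaultdict: a helper scans the raw edge list directly for each RDTSC node's first resolvable successor, and results are grouped with a plain dict.setdefault.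
import Mathlib
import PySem

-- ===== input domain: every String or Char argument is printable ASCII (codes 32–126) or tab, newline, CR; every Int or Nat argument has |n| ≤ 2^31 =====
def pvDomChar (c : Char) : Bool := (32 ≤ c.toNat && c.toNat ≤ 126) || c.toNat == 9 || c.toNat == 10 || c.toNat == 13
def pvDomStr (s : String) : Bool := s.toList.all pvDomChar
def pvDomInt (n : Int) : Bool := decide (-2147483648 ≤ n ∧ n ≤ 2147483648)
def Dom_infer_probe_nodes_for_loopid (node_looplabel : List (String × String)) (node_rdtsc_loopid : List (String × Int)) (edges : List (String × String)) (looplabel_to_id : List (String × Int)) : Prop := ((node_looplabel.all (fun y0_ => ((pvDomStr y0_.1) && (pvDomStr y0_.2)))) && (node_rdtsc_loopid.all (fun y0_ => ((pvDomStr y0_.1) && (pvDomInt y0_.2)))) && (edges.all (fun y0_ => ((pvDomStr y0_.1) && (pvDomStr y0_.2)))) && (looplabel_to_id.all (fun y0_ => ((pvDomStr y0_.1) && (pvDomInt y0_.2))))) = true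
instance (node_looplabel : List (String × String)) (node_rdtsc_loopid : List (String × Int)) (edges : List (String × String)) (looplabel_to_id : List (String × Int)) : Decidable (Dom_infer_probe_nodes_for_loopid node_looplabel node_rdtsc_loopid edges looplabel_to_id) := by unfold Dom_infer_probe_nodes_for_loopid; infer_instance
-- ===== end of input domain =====

-- B drops A's successor adjacency map and defaultdict: it scans the raw edge list
-- directly per RDTSC node and groups with a plain dict.setdefault (simpler decomposition).


-- ===== PORT A =====
-- A: build the successor adjacency map (succs.setdefault(s, []).append(d) ported as
-- modify s [] (· ++ [d])), then for each RDTSC node scan its successor list; the inner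
-- for/break loop with its two .get's is findSome? over that successor list.
def infer_probe_nodes_for_loopid (node_looplabel : List (String × String)) (node_rdtsc_loopid : List (String × Int)) (edges : List (String × String)) (looplabel_to_id : List (String × Int)) : List (Int × List String) :=
  let succs : PySem.Dict String (List String) :=
    edges.foldl (fun d p => d.modify p.1 [] (· ++ [p.2])) PySem.Dict.empty
  let out : PySem.Dict Int (PySem.Set String) :=
    node_rdtsc_loopid.foldl (fun out p =>
      let assigned : Option Int :=
        (succs.getD p.1 []).findSome? (fun dst =>
          match List.lookup dst node_looplabel with
          | none => none
          | some lx => List.lookup lx looplabel_to_id)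
      out.modify (assigned.getD p.2) PySem.Set.empty (fun s => PySem.Set.add s p.1))
      PySem.Dict.empty
  out.items

-- ===== PORT B =====
-- _first_target_lid: walk the raw edge list, return the first resolvable successor's id
def pvFirstTargetLid (node_looplabel : List (String × String)) (looplabel_to_id : List (String × Int)) (edges : List (String × String)) (src : String) : Option Int :=
  match edges with
  | [] => none
  | (s, d) :: rest =>
    if s == src then
      match List.lookup d node_looplabel with
      | some lx =>
        match List.lookup lx looplabel_to_id with
        | some lid => some lid
        | none => pvFirstTargetLid node_looplabel looplabel_to_id rest src
      | none => pvFirstTargetLid node_looplabel looplabel_to_id rest src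
    else pvFirstTargetLid node_looplabel looplabel_to_id rest src

-- the main for-loop of B, as structural recursion over node_rdtsc_loopid;
-- out.setdefault(k, set()).add(src) is ported as modify k empty (add · src)
def pvGroup (node_looplabel : List (String × String)) (looplabel_to_id : List (String × Int)) (edges : List (String × String)) : List (String × Int) → PySem.Dict Int (PySem.Set String) → PySem.Dict Int (PySem.Set String)
  | [], out => out
  | (src, marker) :: rest, out =>
    let aid : Int :=
      match pvFirstTargetLid node_looplabel looplabel_to_id edges src with
      | none => marker
      | some lid => lid
    pvGroup node_looplabel looplabel_to_id edges rest
      (out.modify aid PySem.Set.empty (fun t => PySem.Set.add t src))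

def infer_probe_nodes_for_loopid_alt (node_looplabel : List (String × String)) (node_rdtsc_loopid : List (String × Int)) (edges : List (String × String)) (looplabel_to_id : List (String × Int)) : List (Int × List String) :=
  (pvGroup node_looplabel looplabel_to_id edges node_rdtsc_loopid PySem.Dict.empty).items

-- ===== PRECONDITION & SPEC =====
def Spec_infer_probe_nodes_for_loopid (node_looplabel : List (String × String)) (node_rdtsc_loopid : List (String × Int)) (edges : List (String × String)) (looplabel_to_id : List (String × Int)) (out : List (Int × List String)) : Prop := out = infer_probe_nodes_for_loopid_alt node_looplabel node_rdtsc_loopid edges looplabel_to_id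
instance (node_looplabel : List (String × String)) (node_rdtsc_loopid : List (String × Int)) (edges : List (String × String)) (looplabel_to_id : List (String × Int)) (out : List (Int × List String)) : Decidable (Spec_infer_probe_nodes_for_loopid node_looplabel node_rdtsc_loopid edges looplabel_to_id out) := by unfold Spec_infer_probe_nodes_for_loopid; infer_instance

-- ===== CLAIM (what is proved, stated in full; the proofs are below) =====
def Claim_equal_infer_probe_nodes_for_loopid : Prop := ∀ (node_looplabel : List (String × String)) (node_rdtsc_loopid : List (String × Int)) (edges : List (String × String)) (looplabel_to_id : List (String × Int)), Dom_infer_probe_nodes_for_loopid node_looplabel node_rdtsc_loopid edges looplabel_to_id → Spec_infer_probe_nodes_for_loopid node_looplabel node_rdtsc_loopid edges looplabel_to_id (infer_probe_nodes_for_loopid node_looplabel node_rdtsc_loopid edges looplabel_to_id)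

-- ===== LEMMAS AND PROOFS =====

-- B's direct edge scan equals first-resolvable over the successors of src in edge order
theorem pvFirstTargetLid_eq (nl : List (String × String)) (l2i : List (String × Int)) (edges : List (String × String)) (src : String) :
    pvFirstTargetLid nl l2i edges src =
    ((edges.filter (fun p => p.1 == src)).map Prod.snd).findSome? (fun dst =>
      match List.lookup dst nl with
      | none => none
      | some lx => List.lookup lx l2i) := by
  induction edges with
  | nil => rfl
  | cons p rest ih =>
    obtain ⟨s, d⟩ := p
    simp only [pvFirstTargetLid, List.filter_cons]
    by_cases h : (s == src) = true
    · simp only [h, if_true, List.map_cons, List.findSome?_cons]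
      cases hd : List.lookup d nl with
      | none => simpa [hd] using ih
      | some lx =>
        cases hl : List.lookup lx l2i with
        | none => simpa [hd, hl] using ih
        | some lid => simp [hl]
    · simp only [h]
      simp only [Bool.not_eq_true] at h
      simpa [h] using ih

-- B's recursion computes A's fold over the RDTSC list, from any accumulator
theorem pvGroup_eq_foldl (nl : List (String × String)) (l2i : List (String × Int)) (edges : List (String × String)) (l : List (String × Int)) (out : PySem.Dict Int (PySem.Set String)) :
    pvGroup nl l2i edges l out =
    l.foldl (fun out p =>
      let assigned : Option Int :=
        (((edges.foldl (fun d q => d.modify q.1 [] (· ++ [q.2])) PySem.Dict.empty)).getD p.1 []).findSome? (fun dst =>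
          match List.lookup dst nl with
          | none => none
          | some lx => List.lookup lx l2i)
      out.modify (assigned.getD p.2) PySem.Set.empty (fun s => PySem.Set.add s p.1)) out := by
  induction l generalizing out with
  | nil => rfl
  | cons p rest ih =>
    obtain ⟨src, marker⟩ := p
    simp only [pvGroup, List.foldl_cons]
    rw [ih]
    congr 2
    rw [pvFirstTargetLid_eq, PySem.Dict.getD_foldl_modify_append, PySem.Dict.getD_empty,
        List.nil_append]
    cases ((edges.filter (fun p => p.1 == src)).map Prod.snd).findSome? (fun dst =>
      match List.lookup dst nl with
      | none => none
      | some lx => List.lookup lx l2i) <;> rfl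

-- ===== VERDICT (by name: the statement is the Claim_ definition above) =====
theorem infer_probe_nodes_for_loopid_spec : Claim_equal_infer_probe_nodes_for_loopid := by
  intro nl nr edges l2i _
  unfold Spec_infer_probe_nodes_for_loopid infer_probe_nodes_for_loopid infer_probe_nodes_for_loopid_alt
  rw [pvGroup_eq_foldl]
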